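-- pv_equiv track=rewrite | github.com/trhgquan/CS158 | Lab-02/code/nb.py | doc_in_class
-- ===== SOURCE A (Python) =====
-- def doc_in_class(sentences_list : list, classes : list, classes_list : list) -> dict:
--     '''Divide list of sentences to a dictionary: (key : (sentence1, .., sentence n))
--     '''
--     doc_in_class_dict = {}
--
--     for this_class in classes:
--         doc_in_class_dict[this_class] = []
--         for sentence, that_class in zip(sentences_list, classes_list):
--             if that_class == this_class:
--                 doc_in_class_dict[this_class].append(sentence)
--
--     return doc_in_class_dict
-- ===== SOURCE B (Python) =====
-- def doc_in_class(sentences_list : list, classes : list, classes_list : list) -> dict: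
--     '''Divide list of sentences to a dictionary: (key : (sentence1, .., sentence n))
--     '''
--     doc_in_class_dict = {this_class: [] for this_class in classes}
--     for sentence, that_class in zip(sentences_list, classes_list):
--         if that_class in doc_in_class_dict:
--             doc_in_class_dict[that_class].append(sentence)
--     return doc_in_class_dict
-- ===== Notes on version B (the rewrite author's own statement) =====
-- stated objective: faster
-- what changed: Replaced the per-class rescans of the whole sentence list by pre-initialising the dict keys from classes and then grouping all sentences in a single pass over zip(sentences_list, classes_list).
import Mathlib
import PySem

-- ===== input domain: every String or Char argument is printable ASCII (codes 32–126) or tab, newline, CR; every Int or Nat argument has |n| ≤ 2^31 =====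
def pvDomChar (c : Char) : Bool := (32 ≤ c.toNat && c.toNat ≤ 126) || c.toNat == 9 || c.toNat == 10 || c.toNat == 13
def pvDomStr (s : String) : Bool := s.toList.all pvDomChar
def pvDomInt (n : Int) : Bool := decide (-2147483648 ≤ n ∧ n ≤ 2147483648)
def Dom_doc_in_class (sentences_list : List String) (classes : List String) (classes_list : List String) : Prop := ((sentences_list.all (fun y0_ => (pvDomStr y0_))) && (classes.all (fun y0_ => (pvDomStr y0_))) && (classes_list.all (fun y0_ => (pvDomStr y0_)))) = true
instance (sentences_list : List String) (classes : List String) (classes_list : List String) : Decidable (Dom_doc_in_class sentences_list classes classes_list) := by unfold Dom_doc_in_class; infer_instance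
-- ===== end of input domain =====

-- B replaces A's per-class rescans of the sentence list by one grouping pass over
-- zip(sentences_list, classes_list) into a dict pre-initialised from classes (faster).


-- ===== PORT A =====
-- inner loop of A: for sentence, that_class in zip(...): if that_class == this_class: dict[this_class].append(sentence)
def docInClassInner (c : String) (ps : List (String × String)) (d : PySem.Dict String (List String)) : PySem.Dict String (List String) :=
  ps.foldl (fun d p => if p.2 == c then d.modify c [] (fun v => v ++ [p.1]) else d) d

def doc_in_class (sentences_list : List String) (classes : List String) (classes_list : List String) : List (String × List String) :=
  (classes.foldl
    (fun d this_class => docInClassInner this_class (sentences_list.zip classes_list) (d.insert this_class []))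
    PySem.Dict.empty).items

-- ===== PORT B =====
def doc_in_class_alt (sentences_list : List String) (classes : List String) (classes_list : List String) : List (String × List String) :=
  let d0 := classes.foldl (fun d this_class => d.insert this_class ([] : List String)) PySem.Dict.empty
  ((sentences_list.zip classes_list).foldl
    (fun d p => if d.contains p.2 then d.modify p.2 [] (fun v => v ++ [p.1]) else d) d0).items

-- ===== PRECONDITION & SPEC =====
def Spec_doc_in_class (sentences_list : List String) (classes : List String) (classes_list : List String) (out : List (String × List String)) : Prop := out = doc_in_class_alt sentences_list classes classes_list
instance (sentences_list : List String) (classes : List String) (classes_list : List String) (out : List (String × List String)) : Decidable (Spec_doc_in_class sentences_list classes classes_list out) := by unfold Spec_doc_in_class; infer_instance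

-- ===== CLAIM (what is proved, stated in full; the proofs are below) =====
def Claim_equal_doc_in_class : Prop := ∀ (sentences_list : List String) (classes : List String) (classes_list : List String), Dom_doc_in_class sentences_list classes classes_list → Spec_doc_in_class sentences_list classes classes_list (doc_in_class sentences_list classes classes_list)

-- ===== LEMMAS AND PROOFS =====

-- the grouped value: sentences of the pairs labelled c, in order
def docMatches (ps : List (String × String)) (c : String) : List String :=
  (ps.filter (fun p => p.2 == c)).map (fun p => p.1)

theorem docMatches_cons (p : String × String) (ps : List (String × String)) (c : String) :
    docMatches (p :: ps) c = (if p.2 = c then [p.1] else []) ++ docMatches ps c := by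
  by_cases h : p.2 = c <;> simp [docMatches, h]

-- A's inner loop: appends the matches to key c, leaves everything else alone
theorem innerA_getD (c : String) (ps : List (String × String)) :
    ∀ (d : PySem.Dict String (List String)) (k : String),
      (docInClassInner c ps d).getD k [] =
        if k = c then d.getD c [] ++ docMatches ps c else d.getD k [] := by
  induction ps with
  | nil => intro d k; by_cases h : k = c <;> simp [docInClassInner, docMatches, h]
  | cons p ps ih =>
    intro d k
    by_cases hp : p.2 = c
    · have : docInClassInner c (p :: ps) d
          = docInClassInner c ps (d.modify c [] (fun v => v ++ [p.1])) := by
        simp [docInClassInner, hp]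
      rw [this, ih, docMatches_cons]
      by_cases h : k = c <;>
        simp [h, hp, PySem.Dict.getD_modify]
    · have : docInClassInner c (p :: ps) d = docInClassInner c ps d := by
        simp [docInClassInner, hp]
      rw [this, ih, docMatches_cons]
      simp [hp]

theorem innerA_keys (c : String) (ps : List (String × String)) :
    ∀ (d : PySem.Dict String (List String)), d.contains c = true →
      (docInClassInner c ps d).keys = d.keys := by
  induction ps with
  | nil => intro d _; simp [docInClassInner]
  | cons p ps ih =>
    intro d hc
    by_cases hp : p.2 = c
    · have h1 : docInClassInner c (p :: ps) d
          = docInClassInner c ps (d.modify c [] (fun v => v ++ [p.1])) := by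
        simp [docInClassInner, hp]
      rw [h1, ih _ (by simp [PySem.Dict.contains_modify, hc])]
      rw [PySem.Dict.keys_modify, PySem.Dict.keys_insert_of_contains d _ hc]
    · have h1 : docInClassInner c (p :: ps) d = docInClassInner c ps d := by
        simp [docInClassInner, hp]
      rw [h1, ih d hc]

-- A's outer loop, keys: one Set.add per class
theorem outerA_keys (ps : List (String × String)) (cs : List String) :
    ∀ (d : PySem.Dict String (List String)),
      (cs.foldl (fun d c => docInClassInner c ps (d.insert c [])) d).keys
        = PySem.Set.update d.keys cs := by
  induction cs with
  | nil => intro d; simp [PySem.Set.update]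
  | cons c cs ih =>
    intro d
    have hkeys : (docInClassInner c ps (d.insert c [])).keys = (d.insert c []).keys :=
      innerA_keys c ps _ (PySem.Dict.contains_insert_self d c [])
    have hadd : (d.insert c ([] : List String)).keys = PySem.Set.add d.keys c := by
      by_cases h : d.contains c = true
      · rw [PySem.Dict.keys_insert_of_contains d _ h]
        simp [PySem.Set.add, PySem.Dict.contains_iff_mem_keys] at h ⊢
        simp [h]
      · rw [PySem.Dict.keys_insert_of_not_contains d _ (by simpa using h)]
        simp [PySem.Dict.contains_iff_mem_keys] at h
        simp [PySem.Set.add, h]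
    simp only [List.foldl_cons, ih, hkeys, hadd, PySem.Set.update]

-- A's outer loop, values: every class in cs ends up with its matches
theorem outerA_getD (ps : List (String × String)) (cs : List String) :
    ∀ (d : PySem.Dict String (List String)) (k : String),
      (cs.foldl (fun d c => docInClassInner c ps (d.insert c [])) d).getD k []
        = if k ∈ cs then docMatches ps k else d.getD k [] := by
  induction cs with
  | nil => intro d k; simp
  | cons c cs ih =>
    intro d k
    simp only [List.foldl_cons, ih]
    by_cases hmem : k ∈ cs
    · simp [hmem]
    · rw [innerA_getD]
      by_cases hk : k = c
      · subst hk
        simp [hmem, PySem.Dict.getD_insert_self]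
      · simp [hmem, hk, PySem.Dict.getD_insert]

-- B's init loop
theorem initB_keys (cs : List String) :
    ∀ (d : PySem.Dict String (List String)),
      (cs.foldl (fun d c => d.insert c ([] : List String)) d).keys
        = PySem.Set.update d.keys cs :=
  fun d => PySem.Dict.keys_foldl_insert cs (fun _ _ => []) d

theorem initB_getD (cs : List String) :
    ∀ (d : PySem.Dict String (List String)) (k : String),
      (cs.foldl (fun d c => d.insert c ([] : List String)) d).getD k []
        = if k ∈ cs then [] else d.getD k [] := by
  induction cs with
  | nil => intro d k; simp
  | cons c cs ih =>
    intro d k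
    simp only [List.foldl_cons, ih]
    by_cases hmem : k ∈ cs
    · simp [hmem]
    · by_cases hk : k = c
      · subst hk; simp [hmem, PySem.Dict.getD_insert_self]
      · simp [hmem, hk, PySem.Dict.getD_insert]

-- B's grouping pass keeps the key list
theorem passB_keys (ps : List (String × String)) :
    ∀ (d : PySem.Dict String (List String)),
      (ps.foldl (fun d p => if d.contains p.2 then d.modify p.2 [] (fun v => v ++ [p.1]) else d) d).keys
        = d.keys := by
  induction ps with
  | nil => intro d; simp
  | cons p ps ih =>
    intro d
    by_cases hc : d.contains p.2 = true
    · simp only [List.foldl_cons, hc, if_true, ih]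
      rw [PySem.Dict.keys_modify, PySem.Dict.keys_insert_of_contains d _ hc]
    · rw [List.foldl_cons, if_neg hc, ih]

-- B's grouping pass appends, to every key already present, exactly its matches
theorem passB_getD (ps : List (String × String)) :
    ∀ (d : PySem.Dict String (List String)) (k : String), d.contains k = true →
      (ps.foldl (fun d p => if d.contains p.2 then d.modify p.2 [] (fun v => v ++ [p.1]) else d) d).getD k []
        = d.getD k [] ++ docMatches ps k := by
  induction ps with
  | nil => intro d k _; simp [docMatches]
  | cons p ps ih =>
    intro d k hk
    by_cases hc : d.contains p.2 = true
    · simp only [List.foldl_cons, hc, if_true]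
      rw [ih _ k (by simp [PySem.Dict.contains_modify, hk]), docMatches_cons,
        PySem.Dict.getD_modify]
      by_cases h : k = p.2
      · subst h; simp
      · simp [h, Ne.symm h]
    · rw [List.foldl_cons, if_neg hc]
      have hne : p.2 ≠ k := by
        intro h; rw [h, hk] at hc; exact hc rfl
      rw [ih d k hk, docMatches_cons]
      simp [hne]

-- ===== VERDICT (by name: the statement is the Claim_ definition above) =====
theorem doc_in_class_spec : Claim_equal_doc_in_class := by
  intro sentences_list classes classes_list _
  unfold Spec_doc_in_class doc_in_class doc_in_class_alt
  set ps := sentences_list.zip classes_list with hps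
  set dA := classes.foldl (fun d this_class => docInClassInner this_class ps (d.insert this_class [])) PySem.Dict.empty with hdA
  set d0 := classes.foldl (fun d this_class => d.insert this_class ([] : List String)) PySem.Dict.empty with hd0
  set dB := ps.foldl (fun d p => if d.contains p.2 then d.modify p.2 [] (fun v => v ++ [p.1]) else d) d0 with hdB
  have hkA : dA.keys = PySem.Set.ofList classes := by
    rw [hdA, outerA_keys]; simp [PySem.Set.update, PySem.Set.ofList, PySem.Dict.keys_empty]
  have hk0 : d0.keys = PySem.Set.ofList classes := by
    rw [hd0, initB_keys]; simp [PySem.Set.update, PySem.Set.ofList, PySem.Dict.keys_empty]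
  have hkB : dB.keys = PySem.Set.ofList classes := by rw [hdB, passB_keys, hk0]
  have hndA : dA.keys.Nodup := by rw [hkA]; exact PySem.Set.nodup_ofList classes
  have hndB : dB.keys.Nodup := by rw [hkB]; exact PySem.Set.nodup_ofList classes
  rw [PySem.Dict.items_eq_map_keys dA hndA [], PySem.Dict.items_eq_map_keys dB hndB [],
    hkA, hkB]
  apply List.map_congr_left
  intro k hkmem
  have hkcls : k ∈ classes := (PySem.Set.mem_ofList classes k).mp hkmem
  have hA : dA.getD k [] = docMatches ps k := by
    rw [hdA, outerA_getD]; simp [hkcls]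
  have hc0 : d0.contains k = true := by
    rw [PySem.Dict.contains_iff_mem_keys] at *
    rw [hk0]; exact hkmem
  have hB : dB.getD k [] = docMatches ps k := by
    rw [hdB, passB_getD ps d0 k hc0, hd0, initB_getD]
    simp [hkcls]
  rw [hA, hB]
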